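-- pv_equiv track=rewrite | github.com/GraceZhu1996/Class-Projects | Python/Intro Labs/lab9.py | tally_days_worked
-- ===== SOURCE A (Python) =====
-- def tally_days_worked(E: [])->'dictionary':
--     '''Takes list of workers for amount worked in a week and returns how many days each worker worked'''
--     result = {}
--     for n in E:
--         if n in result:
--                 d = {n: result[n] + 1}
--         else:
--                 d = {n: 1}
--
--         result.update(d)
--
--     return result
-- ===== SOURCE B (Python) =====
-- def tally_days_worked(E: []) -> 'dictionary':
--     '''Takes list of workers for amount worked in a week and returns how many days each worker worked'''
--     uniq = []
--     for n in E:
--         if n not in uniq: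
--             uniq.append(n)
--     return {w: E.count(w) for w in uniq}
-- ===== Notes on version B (the rewrite author's own statement) =====
-- stated objective: alternative
-- what changed: Instead of one accumulating pass that updates a running tally per element, B first collects the distinct workers in first-occurrence order and then counts each one with a full E.count scan; this trades A's single pass for repeated whole-list scans and is slower on large inputs.
import Mathlib
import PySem

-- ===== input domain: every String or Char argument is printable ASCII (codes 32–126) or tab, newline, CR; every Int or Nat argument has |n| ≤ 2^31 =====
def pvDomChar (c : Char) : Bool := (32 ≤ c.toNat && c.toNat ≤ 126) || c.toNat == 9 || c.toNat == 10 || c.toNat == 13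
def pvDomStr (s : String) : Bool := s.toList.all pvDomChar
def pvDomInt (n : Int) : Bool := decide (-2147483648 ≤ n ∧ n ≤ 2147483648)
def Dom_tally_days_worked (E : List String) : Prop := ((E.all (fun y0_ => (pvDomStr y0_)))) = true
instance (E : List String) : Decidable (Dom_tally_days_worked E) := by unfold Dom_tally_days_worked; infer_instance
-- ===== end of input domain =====

-- B collects the distinct workers first, then counts each across the whole list; alternative decomposition, same results.


-- ===== PORT A =====
-- result = {}; for n in E: if n in result: d = {n: result[n]+1} else: d = {n: 1}; result.update(d); return result
def tally_days_worked (E : List String) : List (String × Int) :=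
  (E.foldl (fun result n =>
      if result.contains n then
        result.update [(n, result.getD n 0 + 1)]
      else
        result.update [(n, 1)])
    (PySem.Dict.empty : PySem.Dict String Int)).items

-- ===== PORT B =====
-- uniq = []; for n in E: if n not in uniq: uniq.append(n); return {w: E.count(w) for w in uniq}
def tally_days_worked_alt (E : List String) : List (String × Int) :=
  let uniq := E.foldl (fun u n => if n ∈ u then u else u ++ [n]) ([] : List String)
  uniq.map (fun w => (w, (PySem.List.count E w : Int)))

-- ===== PRECONDITION & SPEC =====
def Spec_tally_days_worked (E : List String) (out : List (String × Int)) : Prop := out = tally_days_worked_alt E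
instance (E : List String) (out : List (String × Int)) : Decidable (Spec_tally_days_worked E out) := by unfold Spec_tally_days_worked; infer_instance

-- ===== CLAIM (what is proved, stated in full; the proofs are below) =====
def Claim_equal_tally_days_worked : Prop := ∀ (E : List String), Dom_tally_days_worked E → Spec_tally_days_worked E (tally_days_worked E)

-- ===== LEMMAS AND PROOFS =====

-- A's accumulating loop is Counter(E).
lemma tally_foldl_eq_counter (E : List String) :
    (E.foldl (fun result n =>
      if result.contains n then
        result.update [(n, result.getD n 0 + 1)]
      else
        result.update [(n, 1)])
    (PySem.Dict.empty : PySem.Dict String Int)) = PySem.Dict.counter E := by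
  rw [← PySem.Dict.foldl_insert_getD_add_one_eq_counter]
  apply PySem.List.foldl_congr_mem
  intro d n _
  by_cases h : d.contains n
  · simp [h, PySem.Dict.update]
  · have h0 : d.getD n 0 = 0 := PySem.Dict.getD_of_not_contains d 0 (by simpa using h)
    simp [h, PySem.Dict.update, h0]

-- B's dedup loop is set(E) in first-occurrence order.
lemma uniq_foldl_eq_ofList (E : List String) :
    E.foldl (fun u n => if n ∈ u then u else u ++ [n]) ([] : List String) = PySem.Set.ofList E := by
  rw [← PySem.Set.update_nil_left, ← List.map_id E, PySem.Set.update_map_eq_foldl_add, List.map_id]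
  symm
  apply PySem.List.foldl_congr_mem
  intro u n _
  exact PySem.Set.add_eq_ite u n

-- ===== VERDICT (by name: the statement is the Claim_ definition above) =====
theorem tally_days_worked_spec : Claim_equal_tally_days_worked := by
  intro E _
  unfold Spec_tally_days_worked tally_days_worked tally_days_worked_alt
  rw [tally_foldl_eq_counter, uniq_foldl_eq_ofList, PySem.Dict.items_counter]
  simp [PySem.List.count_eq]
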